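-- pv_equiv track=rewrite | github.com/alicesilva/P1-Python-Problemas | quantos_comeram.py | quantos_comeram
-- ===== SOURCE A (Python) =====
-- def quantos_comeram(N,fila):
-- 	subtracao = N
-- 	soma = 0
-- 	for i in range(len(fila)):
-- 		subtracao -= int(fila[i])
-- 		if subtracao >= 0:
-- 			soma += int(fila[i])
--
-- 	return soma
-- ===== SOURCE B (Python) =====
-- def quantos_comeram(N, fila):
--     prefs = []
--     t = 0
--     for v in fila:
--         t += v
--         prefs.append(t)
--     return sum(v for v, p in zip(fila, prefs) if p <= N)
-- ===== Notes on version B (the rewrite author's own statement) =====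
-- stated objective: alternative
-- what changed: Replaces the single running-remainder loop with conditional accumulation by a two-phase computation: first build the prefix-sum array, then sum via a zip comprehension each value whose own prefix sum is <= N.
import Mathlib
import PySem

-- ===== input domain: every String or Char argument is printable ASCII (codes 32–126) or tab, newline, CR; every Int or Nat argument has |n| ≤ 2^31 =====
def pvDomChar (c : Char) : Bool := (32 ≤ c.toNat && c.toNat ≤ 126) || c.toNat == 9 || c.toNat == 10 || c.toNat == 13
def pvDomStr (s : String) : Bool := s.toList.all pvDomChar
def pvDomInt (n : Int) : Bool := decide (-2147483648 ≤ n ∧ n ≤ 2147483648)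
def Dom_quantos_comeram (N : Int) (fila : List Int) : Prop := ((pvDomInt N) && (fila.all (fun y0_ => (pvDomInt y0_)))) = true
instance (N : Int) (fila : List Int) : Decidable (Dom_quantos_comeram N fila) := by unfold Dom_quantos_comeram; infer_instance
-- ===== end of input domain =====

-- ===== PORT A =====
-- Port of A: fold over fila carrying (subtracao, soma); condition in the same order as A.
def quantos_comeram (N : Int) (fila : List Int) : Int :=
  (fila.foldl (fun (st : Int × Int) x =>
      let sub := st.1 - x
      (sub, if sub ≥ 0 then st.2 + x else st.2)) (N, 0)).2

-- ===== PORT B =====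
-- Port of B: prefix sums (the accumulate loop = scanl, dropping the initial 0),
-- then sum of each value whose own prefix sum is ≤ N (the zip comprehension).
def quantos_comeram_alt (N : Int) (fila : List Int) : Int :=
  let prefs := (fila.scanl (· + ·) 0).tail
  ((fila.zip prefs).map (fun p => if p.2 ≤ N then p.1 else 0)).sum

-- ===== PRECONDITION & SPEC =====
def Spec_quantos_comeram (N : Int) (fila : List Int) (out : Int) : Prop := out = quantos_comeram_alt N fila
instance (N : Int) (fila : List Int) (out : Int) : Decidable (Spec_quantos_comeram N fila out) := by unfold Spec_quantos_comeram; infer_instance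

-- ===== CLAIM (what is proved, stated in full; the proofs are below) =====
def Claim_equal_quantos_comeram : Prop := ∀ (N : Int) (fila : List Int), Dom_quantos_comeram N fila → Spec_quantos_comeram N fila (quantos_comeram N fila)

-- ===== LEMMAS AND PROOFS =====

-- common recursive characterisation: add x when x ≤ remaining budget, recurse on budget - x
def qcSpec (N : Int) : List Int → Int
  | [] => 0
  | x :: xs => (if x ≤ N then x else 0) + qcSpec (N - x) xs

theorem qc_foldA (xs : List Int) : ∀ (sub soma : Int),
    (xs.foldl (fun (st : Int × Int) x =>
      let sub := st.1 - x
      (sub, if sub ≥ 0 then st.2 + x else st.2)) (sub, soma)).2 = soma + qcSpec sub xs := by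
  induction xs with
  | nil => intro sub soma; simp [qcSpec]
  | cons x xs ih =>
    intro sub soma
    simp only [List.foldl_cons, qcSpec, ih]
    by_cases h : x ≤ sub
    · rw [if_pos (by omega), if_pos h]; ring
    · rw [if_neg (by omega), if_neg h]; ring

theorem qc_zsum (xs : List Int) : ∀ (a N : Int),
    ((xs.zip ((xs.scanl (· + ·) a).tail)).map (fun p => if p.2 ≤ N then p.1 else 0)).sum
      = qcSpec (N - a) xs := by
  induction xs with
  | nil => intro a N; simp [qcSpec]
  | cons x xs ih =>
    intro a N
    simp only [List.scanl_cons, List.tail_cons, qcSpec]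
    have hsc : xs.scanl (· + ·) (a + x) = (a + x) :: (xs.scanl (· + ·) (a + x)).tail := by
      cases xs <;> simp
    rw [hsc]
    simp only [List.zip_cons_cons, List.map_cons, List.sum_cons, ih]
    by_cases h : x ≤ N - a
    · rw [if_pos (by omega), if_pos h]; ring_nf
    · rw [if_neg (by omega), if_neg h]; ring_nf

-- ===== VERDICT (by name: the statement is the Claim_ definition above) =====
theorem quantos_comeram_spec : Claim_equal_quantos_comeram := by
  intro N fila _
  show quantos_comeram N fila = quantos_comeram_alt N fila
  rw [quantos_comeram, quantos_comeram_alt, qc_foldA, qc_zsum]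
  simp
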